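-- pv_equiv track=rewrite | github.com/SausageTaste/Marumaru-Helper | codes/marumaru_helper_v3.py | sec_to_string
-- ===== SOURCE A (Python) =====
-- def sec_to_string(sec:int) -> tuple:
--     unit_t =       ("s", "m", "h", "d")
--     unit_scale_t = ( 1,    60,   60,     24)
--
--     cur_num_i = sec
--     cur_unit_s = "s"
--     for x in range(len(unit_scale_t)):
--         x_unit_s = unit_t[x]
--         x_unit_scale_i = unit_scale_t[x]
--
--         if cur_num_i // x_unit_scale_i > 0:
--             cur_unit_s = x_unit_s
--             cur_num_i = cur_num_i // x_unit_scale_i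
--         else:
--             break
--
--     return cur_num_i, cur_unit_s
-- ===== SOURCE B (Python) =====
-- def sec_to_string(sec: int) -> tuple:
--     if sec // 86400 > 0:
--         return sec // 86400, "d"
--     if sec // 3600 > 0:
--         return sec // 3600, "h"
--     if sec // 60 > 0:
--         return sec // 60, "m"
--     return sec, "s"
-- ===== Notes on version B (the rewrite author's own statement) =====
-- stated objective: simpler
-- what changed: B replaces A's table-driven loop with a running quotient and break by a plain early-return guard chain of three fixed comparisons against the absolute cumulative scales (day, hour, minute), each quotient computed directly from the original sec.
import Mathlib
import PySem

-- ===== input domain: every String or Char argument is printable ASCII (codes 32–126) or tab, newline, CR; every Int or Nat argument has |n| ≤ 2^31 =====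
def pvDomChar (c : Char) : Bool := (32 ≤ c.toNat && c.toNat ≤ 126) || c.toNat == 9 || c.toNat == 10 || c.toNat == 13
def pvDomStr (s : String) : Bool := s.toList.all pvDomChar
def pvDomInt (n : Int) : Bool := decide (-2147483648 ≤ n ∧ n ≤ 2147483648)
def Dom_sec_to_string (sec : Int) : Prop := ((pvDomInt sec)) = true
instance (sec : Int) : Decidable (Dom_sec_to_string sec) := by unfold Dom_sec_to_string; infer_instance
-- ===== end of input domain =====

-- B is a simpler decomposition: a flat early-return guard chain on absolute cumulative scales replaces A's table loop with a running quotient and break.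

-- ===== PORT A =====
-- A's for-loop over the paired unit/scale tuples, with the break encoded as returning the current state.
def pvA_loop : List (String × Int) → Int → String → Int × String
  | [], num, unit => (num, unit)
  | (u, sc) :: rest, num, unit =>
      if PySem.Int.floordiv num sc > 0 then
        pvA_loop rest (PySem.Int.floordiv num sc) u
      else (num, unit)

def sec_to_string (sec : Int) : Int × String :=
  pvA_loop [("s", 1), ("m", 60), ("h", 60), ("d", 24)] sec "s"

-- ===== PORT B =====
-- B's guard chain: three fixed tests against absolute scales, no loop and no running state.
def sec_to_string_alt (sec : Int) : Int × String :=
  if PySem.Int.floordiv sec 86400 > 0 then (PySem.Int.floordiv sec 86400, "d")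
  else if PySem.Int.floordiv sec 3600 > 0 then (PySem.Int.floordiv sec 3600, "h")
  else if PySem.Int.floordiv sec 60 > 0 then (PySem.Int.floordiv sec 60, "m")
  else (sec, "s")

-- ===== PRECONDITION & SPEC =====
def Spec_sec_to_string (sec : Int) (out : Int × String) : Prop := out = sec_to_string_alt sec
instance (sec : Int) (out : Int × String) : Decidable (Spec_sec_to_string sec out) := by unfold Spec_sec_to_string; infer_instance

-- ===== CLAIM (what is proved, stated in full; the proofs are below) =====
def Claim_equal_sec_to_string : Prop := ∀ (sec : Int), Dom_sec_to_string sec → Spec_sec_to_string sec (sec_to_string sec)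

-- ===== LEMMAS AND PROOFS =====

theorem pv_fd_fd (a : Int) (b c : Int) (hb : 0 < b) (hc : 0 < c) :
    PySem.Int.floordiv (PySem.Int.floordiv a b) c = PySem.Int.floordiv a (b * c) := by
  rw [PySem.Int.floordiv_eq_ediv_of_pos hb, PySem.Int.floordiv_eq_ediv_of_pos hc,
      PySem.Int.floordiv_eq_ediv_of_pos (mul_pos hb hc), Int.ediv_ediv_of_nonneg (le_of_lt hb)]

theorem pv_main (sec : Int) : sec_to_string sec = sec_to_string_alt sec := by
  unfold sec_to_string sec_to_string_alt
  simp only [pvA_loop]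
  have h1 : PySem.Int.floordiv sec 1 = sec := by
    rw [PySem.Int.floordiv_eq_ediv_of_pos (by norm_num)]; simp
  have h60 : PySem.Int.floordiv sec 60 = sec / 60 := PySem.Int.floordiv_eq_ediv_of_pos (by norm_num)
  have h3600 : PySem.Int.floordiv (PySem.Int.floordiv sec 60) 60 = PySem.Int.floordiv sec 3600 := by
    rw [pv_fd_fd sec 60 60 (by norm_num) (by norm_num)]; norm_num
  have h86400 : PySem.Int.floordiv (PySem.Int.floordiv (PySem.Int.floordiv sec 60) 60) 24
      = PySem.Int.floordiv sec 86400 := by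
    rw [h3600, pv_fd_fd sec 3600 24 (by norm_num) (by norm_num)]; norm_num
  have e3600 : PySem.Int.floordiv sec 3600 = sec / 3600 := PySem.Int.floordiv_eq_ediv_of_pos (by norm_num)
  have e86400 : PySem.Int.floordiv sec 86400 = sec / 86400 := PySem.Int.floordiv_eq_ediv_of_pos (by norm_num)
  rw [h1]
  by_cases hs : sec > 0
  · simp only [hs, if_true]
    rw [h60]
    by_cases hm : sec / 60 > 0
    · simp only [hm, if_true]
      rw [show PySem.Int.floordiv (sec / 60) 60 = sec / 3600 by rw [← h60, h3600, e3600]]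
      by_cases hh : sec / 3600 > 0
      · simp only [hh, if_true]
        rw [show PySem.Int.floordiv (sec / 3600) 24 = sec / 86400 by rw [← e3600, ← h3600, h86400, e86400]]
        by_cases hd : sec / 86400 > 0
        · simp [pvA_loop, hd]
        · simp only [hd, if_false]
          rw [e86400] at *
          simp [hd, hh]
      · have hd : ¬ (sec / 86400 > 0) := by omega
        simp [pvA_loop, hh, hd]
    · have hh : ¬ (sec / 3600 > 0) := by omega
      have hd : ¬ (sec / 86400 > 0) := by omega
      simp [hm, hh, hd, e86400]
  · have hm : ¬ (sec / 60 > 0) := by omega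
    have hh : ¬ (sec / 3600 > 0) := by omega
    have hd : ¬ (sec / 86400 > 0) := by omega
    simp [hs, hm, hh, hd, e86400]

-- ===== VERDICT (by name: the statement is the Claim_ definition above) =====
theorem sec_to_string_spec : Claim_equal_sec_to_string := by
  intro sec _
  unfold Spec_sec_to_string
  exact pv_main sec
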